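-- pv_equiv track=rewrite | github.com/atharao/NPTEL-Python-Questions | Transcrip.py | transcript
-- ===== SOURCE A (Python) =====
-- def transcript(coursedetails, studentdetails, grades):
--     course_dict = dict(coursedetails)
--     student_dict = dict(studentdetails)
--
--     student_grades = {}
--     for rollnumber, coursecode, grade in grades:
--         if rollnumber not in student_grades:
--             student_grades[rollnumber] = []
--         student_grades[rollnumber].append((coursecode, grade))
--
--     transcript_list = []
--     for rollnumber, name in studentdetails:
--         if rollnumber in student_grades:
--             student_grades[rollnumber].sort(key=lambda x: x[0])  # Sort grades by course code
--             courses_with_grades = [(code, course_dict[code], grade) for code, grade in student_grades[rollnumber]]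
--             transcript_list.append((rollnumber, name, courses_with_grades))
--
--     transcript_list.sort(key=lambda x: x[0])
--
--     return transcript_list
-- ===== SOURCE B (Python) =====
-- def transcript(coursedetails, studentdetails, grades):
--     course_dict = dict(coursedetails)
--     result = []
--     for roll, name in sorted(studentdetails, key=lambda s: s[0]):
--         rows = sorted([(c, g) for r, c, g in grades if r == roll], key=lambda x: x[0])
--         if rows:
--             result.append((roll, name, [(c, course_dict[c], g) for c, g in rows]))
--     return result
-- ===== Notes on version B (the rewrite author's own statement) =====
-- stated objective: simpler
-- what changed: B drops A's grouping dict and final result sort: it sorts studentdetails by roll up front and, for each student in that order, collects that student's grades by a direct scan of the grades list, appending transcripts already in roll order.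
import Mathlib
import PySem

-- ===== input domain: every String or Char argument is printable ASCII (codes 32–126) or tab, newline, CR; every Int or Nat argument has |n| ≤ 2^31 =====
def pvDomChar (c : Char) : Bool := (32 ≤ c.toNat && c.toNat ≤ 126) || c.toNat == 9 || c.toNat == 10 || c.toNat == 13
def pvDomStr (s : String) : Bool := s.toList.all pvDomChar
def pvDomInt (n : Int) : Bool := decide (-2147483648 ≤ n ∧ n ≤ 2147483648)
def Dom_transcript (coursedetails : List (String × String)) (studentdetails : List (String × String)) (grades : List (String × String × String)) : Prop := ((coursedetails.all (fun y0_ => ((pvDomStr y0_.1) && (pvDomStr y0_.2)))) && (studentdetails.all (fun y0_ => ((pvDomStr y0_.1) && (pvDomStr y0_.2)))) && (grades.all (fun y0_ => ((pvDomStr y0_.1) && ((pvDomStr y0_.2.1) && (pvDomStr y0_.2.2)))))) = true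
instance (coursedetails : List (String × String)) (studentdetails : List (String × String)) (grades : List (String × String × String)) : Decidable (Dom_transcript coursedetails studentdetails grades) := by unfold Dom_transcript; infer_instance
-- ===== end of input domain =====

-- B replaces A's grouping dict and final result sort by pre-sorting the students and scanning the
-- grades list per student (simpler decomposition, no grouping dict, no post-sort); return value only.

-- ===== PORT A =====
-- A-side helper: the body of A's grouping loop
--   if rollnumber not in student_grades: student_grades[rollnumber] = []
--   student_grades[rollnumber].append((coursecode, grade))
def aGroupStep (d : PySem.Dict String (List (String × String))) (g : String × String × String) : PySem.Dict String (List (String × String)) :=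
  let d1 := if d.contains g.1 then d else d.insert g.1 []
  d1.insert g.1 (d1.getD g.1 [] ++ [(g.2.1, g.2.2)])

-- A's `student_dict = dict(studentdetails)` is built but never used (pure), so it is dropped here.
-- A sorts `student_grades[rollnumber]` IN PLACE; the port recomputes the sorted list at each use
-- (the same value: sorting is idempotent). `course_dict[code]` is `getD … ""`; Pre_ rules out the
-- KeyError inputs, so the default is never read on admitted inputs.
def transcript (coursedetails : List (String × String)) (studentdetails : List (String × String)) (grades : List (String × String × String)) : List (String × String × (List (String × String × String))) :=
  let course_dict := PySem.Dict.ofList coursedetails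
  let student_grades := grades.foldl aGroupStep PySem.Dict.empty
  let transcript_list := studentdetails.foldl (fun acc sn =>
      if student_grades.contains sn.1 then
        acc ++ [(sn.1, sn.2,
          (PySem.List.sorted (student_grades.getD sn.1 []) (fun x => x.1)).map
            (fun cg => (cg.1, course_dict.getD cg.1 "", cg.2)))]
      else acc) []
  PySem.List.sorted transcript_list (fun x => x.1)

-- ===== PORT B =====
def transcript_alt (coursedetails : List (String × String)) (studentdetails : List (String × String)) (grades : List (String × String × String)) : List (String × String × (List (String × String × String))) :=
  let course_dict := PySem.Dict.ofList coursedetails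
  (PySem.List.sorted studentdetails (fun s => s.1)).foldl (fun acc sn =>
      let rows := PySem.List.sorted ((grades.filter (fun g => g.1 == sn.1)).map (fun g => (g.2.1, g.2.2))) (fun x => x.1)
      if rows ≠ [] then
        acc ++ [(sn.1, sn.2, rows.map (fun cg => (cg.1, course_dict.getD cg.1 "", cg.2)))]
      else acc) []

-- ===== PRECONDITION & SPEC =====
-- Pre_ excludes exactly the inputs where A raises KeyError: a grade of a student that is listed in
-- studentdetails names a course code absent from coursedetails.
def Pre_transcript (coursedetails : List (String × String)) (studentdetails : List (String × String)) (grades : List (String × String × String)) : Prop :=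
  ∀ g ∈ grades, (∃ s ∈ studentdetails, s.1 = g.1) → (∃ c ∈ coursedetails, c.1 = g.2.1)
instance (coursedetails : List (String × String)) (studentdetails : List (String × String)) (grades : List (String × String × String)) : Decidable (Pre_transcript coursedetails studentdetails grades) := by unfold Pre_transcript; infer_instance

def pvWitness_transcript : (List (String × String)) × (List (String × String)) × (List (String × String × String)) :=
  ([("C1", "Maths"), ("C2", "Physics")], [("R2", "Bob"), ("R1", "Ann")], [("R1", "C2", "A"), ("R1", "C1", "B"), ("R2", "C1", "A")])

def Spec_transcript (coursedetails : List (String × String)) (studentdetails : List (String × String)) (grades : List (String × String × String)) (out : List (String × String × (List (String × String × String)))) : Prop := out = transcript_alt coursedetails studentdetails grades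
instance (coursedetails : List (String × String)) (studentdetails : List (String × String)) (grades : List (String × String × String)) (out : List (String × String × (List (String × String × String)))) : Decidable (Spec_transcript coursedetails studentdetails grades out) := by unfold Spec_transcript; infer_instance

-- ===== CLAIM (what is proved, stated in full; the proofs are below) =====
def Claim_equal_transcript : Prop := ∀ (coursedetails : List (String × String)) (studentdetails : List (String × String)) (grades : List (String × String × String)), Dom_transcript coursedetails studentdetails grades → Pre_transcript coursedetails studentdetails grades → Spec_transcript coursedetails studentdetails grades (transcript coursedetails studentdetails grades)

-- ===== LEMMAS AND PROOFS =====

theorem groupStep_getD (d : PySem.Dict String (List (String × String))) (g : String × String × String) (r : String) :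
    (aGroupStep d g).getD r [] = if g.1 == r then d.getD r [] ++ [(g.2.1, g.2.2)] else d.getD r [] := by
  unfold aGroupStep
  by_cases he : g.1 = r
  · subst he
    by_cases hc : d.contains g.1
    · simp [hc, PySem.Dict.getD_insert_self]
    · have h0 : d.getD g.1 [] = [] :=
        PySem.Dict.getD_of_not_contains d [] (by simpa using hc)
      simp [hc, PySem.Dict.getD_insert_self, h0]
  · have hne : r ≠ g.1 := fun h => he h.symm
    by_cases hc : d.contains g.1 <;>
      simp [hc, he, PySem.Dict.getD_insert_of_ne _ _ _ hne]

theorem groupStep_contains (d : PySem.Dict String (List (String × String))) (g : String × String × String) (r : String) :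
    (aGroupStep d g).contains r = (d.contains r || g.1 == r) := by
  unfold aGroupStep
  by_cases he : r = g.1
  · subst he
    by_cases hc : d.contains g.1 <;> simp [hc]
  · have h1 : (r == g.1) = false := by simp [he]
    have h2 : (g.1 == r) = false := by simp [Ne.symm he]
    by_cases hc : d.contains g.1 <;>
      simp [hc, PySem.Dict.contains_insert, h1, h2]

theorem group_getD (gs : List (String × String × String)) (d : PySem.Dict String (List (String × String))) (r : String) :
    (gs.foldl aGroupStep d).getD r [] = d.getD r [] ++ (gs.filter (fun g => g.1 == r)).map (fun g => (g.2.1, g.2.2)) := by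
  induction gs generalizing d with
  | nil => simp
  | cons g gs ih =>
    simp only [List.foldl_cons, ih, groupStep_getD, List.filter_cons]
    by_cases he : g.1 == r <;> simp [he]

theorem group_contains (gs : List (String × String × String)) (d : PySem.Dict String (List (String × String))) (r : String) :
    (gs.foldl aGroupStep d).contains r = (d.contains r || gs.any (fun g => g.1 == r)) := by
  induction gs generalizing d with
  | nil => simp
  | cons g gs ih => simp [List.foldl_cons, ih, groupStep_contains, Bool.or_assoc]

theorem insertBy_cons {α : Type} (b : α → α → Bool) (x y : α) (ys : List α) :
    PySem.List.insertBy b x (y :: ys) = if b x y then x :: y :: ys else y :: PySem.List.insertBy b x ys := rfl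

theorem insertBy_forall_before {α : Type} (b : α → α → Bool) (x : α) (l : List α)
    (h : ∀ y ∈ l, b x y = true) : PySem.List.insertBy b x l = x :: l := by
  cases l with
  | nil => rfl
  | cons y ys => rw [insertBy_cons, if_pos (h y (by simp))]

theorem filter_insertBy {α : Type} (key : α → String) (p : α → Bool) (x : α) (l : List α)
    (hl : l.Pairwise (fun a b => key a ≤ key b)) :
    (PySem.List.insertBy (fun a b => decide (key a < key b)) x l).filter p
      = if p x then PySem.List.insertBy (fun a b => decide (key a < key b)) x (l.filter p) else l.filter p := by
  induction l with
  | nil =>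
    by_cases hp : p x <;> simp only [PySem.List.insertBy, List.filter, hp, if_true]; rfl
  | cons y t ih =>
    rcases List.pairwise_cons.mp hl with ⟨hy, ht⟩
    rw [insertBy_cons]
    by_cases hb : key x < key y
    · rw [if_pos (decide_eq_true hb)]
      by_cases hp : p x
      · rw [List.filter_cons, if_pos hp, if_pos hp]
        rw [insertBy_forall_before]
        intro z hz
        rcases List.mem_cons.mp (List.mem_of_mem_filter hz) with h1 | h1
        · subst h1; exact decide_eq_true hb
        · exact decide_eq_true (lt_of_lt_of_le hb (hy z h1))
      · rw [List.filter_cons, if_neg (by simp [hp]), if_neg (by simp [hp])]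
    · rw [if_neg (by simpa using hb)]
      by_cases hpy : p y
      · rw [List.filter_cons, if_pos hpy, List.filter_cons, if_pos hpy, ih ht]
        by_cases hp : p x
        · rw [if_pos hp, if_pos hp, insertBy_cons, if_neg (by simpa using hb)]
        · rw [if_neg (by simp [hp]), if_neg (by simp [hp])]
      · have hft : List.filter p (y :: t) = List.filter p t := by
          rw [List.filter_cons, if_neg (by simp [hpy])]
        rw [List.filter_cons, if_neg (by simp [hpy]), ih ht, hft]

theorem sorted_append_singleton {α : Type} (key : α → String) (l : List α) (x : α) :
    PySem.List.sorted (l ++ [x]) key = PySem.List.insertBy (fun a b => decide (key a < key b)) x (PySem.List.sorted l key) := by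
  simp [PySem.List.sorted, List.foldl_append]

theorem sorted_filter {α : Type} (key : α → String) (p : α → Bool) (l : List α) :
    (PySem.List.sorted l key).filter p = PySem.List.sorted (l.filter p) key := by
  induction l using List.reverseRecOn with
  | nil => rfl
  | append_singleton l x ih =>
    rw [sorted_append_singleton, filter_insertBy key p x _ (PySem.List.sorted_pairwise l key),
      List.filter_append, ih]
    by_cases hp : p x
    · rw [if_pos hp, List.filter_cons, if_pos hp, List.filter_nil, sorted_append_singleton]
    · rw [if_neg (by simp [hp]), List.filter_cons, if_neg (by simp [hp]), List.filter_nil, List.append_nil]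

theorem insertBy_map {α β : Type} (keya : α → String) (keyb : β → String) (F : α → β)
    (hF : ∀ a, keyb (F a) = keya a) (x : α) (l : List α) :
    PySem.List.insertBy (fun a b => decide (keyb a < keyb b)) (F x) (l.map F)
      = (PySem.List.insertBy (fun a b => decide (keya a < keya b)) x l).map F := by
  induction l with
  | nil => rfl
  | cons y t ih =>
    rw [List.map_cons, insertBy_cons, insertBy_cons]
    have hkey : (decide (keyb (F x) < keyb (F y))) = (decide (keya x < keya y)) := by rw [hF, hF]
    rw [hkey]
    by_cases hb : keya x < keya y
    · rw [if_pos (decide_eq_true hb), if_pos (decide_eq_true hb), List.map_cons, List.map_cons]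
    · rw [if_neg (by simpa using hb), if_neg (by simpa using hb), List.map_cons, ih]

theorem sorted_map {α β : Type} (keya : α → String) (keyb : β → String) (F : α → β)
    (hF : ∀ a, keyb (F a) = keya a) (l : List α) :
    PySem.List.sorted (l.map F) keyb = (PySem.List.sorted l keya).map F := by
  induction l using List.reverseRecOn with
  | nil => rfl
  | append_singleton l x ih =>
    rw [List.map_append, List.map_singleton, sorted_append_singleton,
      sorted_append_singleton, ih, insertBy_map keya keyb F hF]

theorem transcript_eq (coursedetails studentdetails : List (String × String)) (grades : List (String × String × String)) :
    transcript coursedetails studentdetails grades = transcript_alt coursedetails studentdetails grades := by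
  unfold transcript transcript_alt
  simp only [PySem.List.foldl_append_if, PySem.List.foldl_append_ite, List.nil_append]
  have hrows : ∀ r : String, (List.foldl aGroupStep PySem.Dict.empty grades).getD r []
      = List.map (fun g => (g.2.1, g.2.2)) (List.filter (fun g => g.1 == r) grades) := by
    intro r; simpa using group_getD grades PySem.Dict.empty r
  have hcond : (fun x : String × String => (List.foldl aGroupStep PySem.Dict.empty grades).contains x.1)
      = (fun x : String × String => decide
          ((PySem.List.sorted (List.map (fun g => (g.2.1, g.2.2)) (List.filter (fun g => g.1 == x.1) grades)) fun x => x.1) ≠ [])) := by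
    funext x
    rw [group_contains]
    rcases Bool.eq_false_or_eq_true (grades.any fun g => g.1 == x.1) with h | h <;> rw [h]
    · obtain ⟨g, hg, hgx⟩ := List.any_eq_true.mp h
      have hne : List.filter (fun g => g.1 == x.1) grades ≠ [] := by
        intro hnil
        rw [List.filter_eq_nil_iff] at hnil
        exact absurd hgx (by simpa using hnil g hg)
      simp [PySem.List.sorted_eq_nil_iff, List.map_eq_nil_iff, hne]
    · have hnil : List.filter (fun g => g.1 == x.1) grades = [] := by
        rw [List.filter_eq_nil_iff]
        intro a ha hax
        have := List.any_eq_false.mp h a ha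
        simp_all
      simp [PySem.List.sorted_eq_nil_iff, hnil]
  have hfun : (fun x : String × String =>
        ((x.1, x.2,
          List.map (fun cg => (cg.1, (PySem.Dict.ofList coursedetails).getD cg.1 "", cg.2))
            (PySem.List.sorted ((List.foldl aGroupStep PySem.Dict.empty grades).getD x.1 []) fun x => x.1)) : String × String × List (String × String × String)))
      = (fun x : String × String =>
        (x.1, x.2,
          List.map (fun cg => (cg.1, (PySem.Dict.ofList coursedetails).getD cg.1 "", cg.2))
            (PySem.List.sorted (List.map (fun g => (g.2.1, g.2.2)) (List.filter (fun g => g.1 == x.1) grades)) fun x => x.1))) := by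
    funext x; rw [hrows]
  rw [hcond, hfun, sorted_filter]
  exact sorted_map (fun s : String × String => s.1) (fun x : String × String × List (String × String × String) => x.1) _ (fun a => rfl) _

-- ===== VERDICT (by name: the statement is the Claim_ definition above) =====
theorem transcript_spec : Claim_equal_transcript := by
  intro cd sd gr _ _
  unfold Spec_transcript
  exact transcript_eq cd sd gr
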